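-- pv_equiv track=rewrite | github.com/jiahengxiong/QKD_power | utils/util.py | can_connect_path
-- ===== SOURCE A (Python) =====
-- from collections import deque
--
-- def can_connect_path(path, laser_detector):
--     """
--     检查给定的 laser_detector 对是否能覆盖整个 path。
--     优化版：基于 path 索引的快速连通性检查，避免构建 NetworkX 图。
--
--     Args:
--         path: 节点列表 [n0, n1, ..., nL]
--         laser_detector: 边列表 [[u1, v1], [u2, v2], ...]，u,v 都在 path 上
--     """
--     if not path: return False
--
--     # 1. 建立节点到索引的映射
--     # O(V)
--     node_to_idx = {node: i for i, node in enumerate(path)}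
--     target_idx = len(path) - 1
--
--     # 2. 将边转换为索引邻接表
--     # O(E)
--     adj = [[] for _ in range(len(path))]
--     for u, v in laser_detector:
--         # 安全检查：确保 u, v 都在 path 上
--         # 虽然调用方应该保证，但这里再次确认
--         if u in node_to_idx and v in node_to_idx:
--             u_idx = node_to_idx[u]
--             v_idx = node_to_idx[v]
--             # 只考虑前向边 (u -> v)，避免环路干扰
--             if u_idx < v_idx:
--                 adj[u_idx].append(v_idx)
--
--     # 3. 快速 BFS (在索引空间)
--     # O(V + E)
--     queue = deque([0])
--     visited = {0} # 使用 set 记录访问过的索引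
--
--     while queue:
--         curr = queue.popleft()
--         if curr == target_idx:
--             return True
--
--         for nxt in adj[curr]:
--             if nxt not in visited:
--                 visited.add(nxt)
--                 queue.append(nxt)
--
--     return False
-- ===== SOURCE B (Python) =====
-- def can_connect_path(path, laser_detector):
--     """Same connectivity check, but the BFS (queue + visited set) is replaced by a
--     single left-to-right boolean-table sweep, valid because only forward edges
--     (u_idx < v_idx) are kept."""
--     if not path:
--         return False
--
--     node_to_idx = {node: i for i, node in enumerate(path)}
--     target_idx = len(path) - 1
--
--     adj = [[] for _ in range(len(path))]
--     for u, v in laser_detector: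
--         if u in node_to_idx and v in node_to_idx:
--             u_idx = node_to_idx[u]
--             v_idx = node_to_idx[v]
--             if u_idx < v_idx:
--                 adj[u_idx].append(v_idx)
--
--     reachable = [False] * len(path)
--     reachable[0] = True
--     for i in range(len(path)):
--         if reachable[i]:
--             for nxt in adj[i]:
--                 reachable[nxt] = True
--     return reachable[target_idx]
-- ===== Notes on version B (the rewrite author's own statement) =====
-- stated objective: simpler
-- what changed: The BFS (deque + visited set) is replaced by a single left-to-right dynamic-programming sweep over a boolean reachability table, which is sound because only forward edges (u_idx < v_idx) are kept; the node-to-index map and forward adjacency construction are unchanged.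
import Mathlib
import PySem

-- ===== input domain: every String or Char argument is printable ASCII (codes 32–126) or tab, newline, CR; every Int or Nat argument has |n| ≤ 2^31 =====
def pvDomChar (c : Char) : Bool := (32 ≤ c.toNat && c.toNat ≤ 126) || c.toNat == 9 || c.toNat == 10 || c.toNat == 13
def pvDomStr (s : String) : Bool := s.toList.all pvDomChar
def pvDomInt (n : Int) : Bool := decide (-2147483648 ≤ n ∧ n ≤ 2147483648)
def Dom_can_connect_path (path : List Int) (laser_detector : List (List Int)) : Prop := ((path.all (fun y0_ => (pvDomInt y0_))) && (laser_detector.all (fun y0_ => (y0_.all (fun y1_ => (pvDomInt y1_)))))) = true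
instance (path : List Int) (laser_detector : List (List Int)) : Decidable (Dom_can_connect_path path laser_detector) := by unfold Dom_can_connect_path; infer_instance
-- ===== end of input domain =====

-- B replaces A's BFS (deque + visited set) by a single left-to-right boolean-table
-- sweep, sound because only forward edges (u_idx < v_idx) are kept; the index map
-- and adjacency construction are shared.

-- ===== PORT A =====
-- shared helpers: both Pythons build the node→index map and the forward adjacency
-- list with identical code, so both ports call these two helpers.

-- node_to_idx = {node: i for i, node in enumerate(path)}  (enumerate indices are
-- the naturals 0..len-1, represented as Nat; later-index wins on duplicates, as in Python)
def buildIdx (path : List Int) : PySem.Dict Int Nat :=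
  path.zipIdx.foldl (fun d p => d.insert p.1 p.2) PySem.Dict.empty

-- adj = [[] for _ in range(len(path))]; for u, v in laser_detector: …
-- (edges whose list is not a pair are skipped: excluded by Pre_, Python raises there)
def buildAdj (idx : PySem.Dict Int Nat) (n : Nat) (edges : List (List Int)) : List (List Nat) :=
  edges.foldl (fun adj e =>
    match e with
    | [u, v] =>
      match idx.get? u, idx.get? v with
      | some ui, some vi => if ui < vi then adj.modify ui (fun l => l ++ [vi]) else adj
      | _, _ => adj
    | _ => adj) (List.replicate n [])

-- values stored in buildIdx are positions in path, hence < path.length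
theorem buildIdx_lt (path : List Int) (k : Int) (v : Nat)
    (h : (buildIdx path).get? k = some v) : v < path.length := by
  have key : ∀ (l : List (Int × Nat)) (d : PySem.Dict Int Nat) (k : Int) (v : Nat),
      (l.foldl (fun d p => d.insert p.1 p.2) d).get? k = some v →
      (∃ p ∈ l, p.2 = v) ∨ d.get? k = some v := by
    intro l
    induction l with
    | nil => intro d k v h; exact Or.inr h
    | cons a t ih =>
      intro d k v h
      simp only [List.foldl_cons] at h
      rcases ih _ _ _ h with h1 | h2
      · obtain ⟨p, hp, he⟩ := h1
        exact Or.inl ⟨p, List.mem_cons_of_mem _ hp, he⟩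
      · rw [PySem.Dict.get?_insert] at h2
        by_cases hk : k = a.1
        · rw [if_pos hk] at h2
          exact Or.inl ⟨a, List.mem_cons_self, Option.some_inj.mp h2⟩
        · rw [if_neg hk] at h2
          exact Or.inr h2
  unfold buildIdx at h
  rcases key _ _ _ _ h with h1 | h2
  · obtain ⟨⟨x, i⟩, hp, he⟩ := h1
    have := List.mem_zipIdx hp
    simp only at he
    omega
  · simp [PySem.Dict.get?, PySem.Dict.empty] at h2

-- invariant of buildAdj: length n, and every stored edge i→j satisfies i < j < n
theorem buildAdj_inv (idx : PySem.Dict Int Nat) (n : Nat) (edges : List (List Int))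
    (hidx : ∀ k v, idx.get? k = some v → v < n) :
    (buildAdj idx n edges).length = n ∧
      ∀ i j, j ∈ (buildAdj idx n edges).getD i [] → i < j ∧ j < n := by
  have modinv : ∀ (adj : List (List Nat)) (ui vi : Nat), adj.length = n →
      (∀ i j, j ∈ adj.getD i [] → i < j ∧ j < n) → ui < vi → vi < n →
      ((adj.modify ui (fun l => l ++ [vi])).length = n ∧
        ∀ i j, j ∈ (adj.modify ui (fun l => l ++ [vi])).getD i [] → i < j ∧ j < n) := by
    intro adj ui vi hlen hinv huv hvn
    refine ⟨by simp [hlen], ?_⟩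
    intro i j hj
    rw [List.getD_eq_getElem?_getD, List.getElem?_modify] at hj
    cases hg : adj[i]? with
    | none => rw [hg] at hj; simp at hj
    | some l =>
      rw [hg] at hj
      have hgl : adj.getD i [] = l := by rw [List.getD_eq_getElem?_getD, hg]; rfl
      by_cases hie : ui = i
      · simp only [hie] at hj
        rcases List.mem_append.mp hj with hl | hr
        · exact hinv i j (hgl ▸ hl)
        · have : j = vi := by simpa using hr
          subst this; exact ⟨hie ▸ huv, hvn⟩
      · simp only [if_neg hie] at hj
        exact hinv i j (hgl ▸ hj)
  have key : ∀ (es : List (List Int)) (adj : List (List Nat)), adj.length = n →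
      (∀ i j, j ∈ adj.getD i [] → i < j ∧ j < n) →
      ((es.foldl (fun adj e =>
          match e with
          | [u, v] =>
            match idx.get? u, idx.get? v with
            | some ui, some vi => if ui < vi then adj.modify ui (fun l => l ++ [vi]) else adj
            | _, _ => adj
          | _ => adj) adj).length = n ∧
        ∀ i j, j ∈ (es.foldl (fun adj e =>
          match e with
          | [u, v] =>
            match idx.get? u, idx.get? v with
            | some ui, some vi => if ui < vi then adj.modify ui (fun l => l ++ [vi]) else adj
            | _, _ => adj
          | _ => adj) adj).getD i [] → i < j ∧ j < n) := by
    intro es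
    induction es with
    | nil => intro adj hlen hinv; exact ⟨hlen, hinv⟩
    | cons e t ih =>
      intro adj hlen hinv
      simp only [List.foldl_cons]
      match e with
      | [] => exact ih _ hlen hinv
      | [u] => exact ih _ hlen hinv
      | u :: v :: w :: r => exact ih _ hlen hinv
      | [u, v] =>
        cases hu : idx.get? u with
        | none => simp only [hu]; exact ih _ hlen hinv
        | some ui =>
          cases hv : idx.get? v with
          | none => simp only [hu, hv]; exact ih _ hlen hinv
          | some vi =>
            simp only [hu, hv]
            by_cases huv : ui < vi
            · rw [if_pos huv]
              obtain ⟨hl2, hi2⟩ := modinv adj ui vi hlen hinv huv (hidx v vi hv)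
              exact ih _ hl2 hi2
            · rw [if_neg huv]; exact ih _ hlen hinv
  unfold buildAdj
  refine key edges (List.replicate n []) (by simp) ?_
  intro i j hj
  rw [List.getD_eq_getElem?_getD, List.getElem?_replicate] at hj
  split at hj <;> simp at hj

-- the bound the BFS port needs for termination (cited by name inside can_connect_path)
theorem buildAdj_bound (path : List Int) (laser_detector : List (List Int)) :
    ∀ l ∈ buildAdj (buildIdx path) path.length laser_detector, ∀ j ∈ l, j < path.length := by
  obtain ⟨-, hinv⟩ := buildAdj_inv (buildIdx path) path.length laser_detector
    (buildIdx_lt path)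
  intro l hl j hj
  obtain ⟨i, hi, hil⟩ := List.getElem_of_mem hl
  have hg : (buildAdj (buildIdx path) path.length laser_detector).getD i [] = l := by
    rw [List.getD_eq_getElem?_getD, List.getElem?_eq_getElem hi, hil]; rfl
  exact (hinv i j (hg ▸ hj)).2

-- inner loop of the BFS: 'for nxt in adj[curr]: if nxt not in visited: …'
def bfsExpand (nbrs queue visited : List Nat) : List Nat × List Nat :=
  match nbrs with
  | [] => (queue, visited)
  | j :: rest =>
    if j ∈ visited then bfsExpand rest queue visited
    else bfsExpand rest (queue ++ [j]) (visited ++ [j])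

-- termination measure: number of indices < n not yet visited, plus queue length
def pvUnvisited (n : Nat) (visited : List Nat) : Nat :=
  ((Finset.range n).filter (fun x => x ∉ visited)).card

theorem bfsExpand_measure (nbrs queue visited : List Nat) {n : Nat}
    (h : ∀ j ∈ nbrs, j < n) :
    pvUnvisited n (bfsExpand nbrs queue visited).2 + (bfsExpand nbrs queue visited).1.length
      = pvUnvisited n visited + queue.length := by
  induction nbrs generalizing queue visited with
  | nil => rfl
  | cons j rest ih =>
    have hjn : j < n := h j List.mem_cons_self
    have hrest : ∀ x ∈ rest, x < n := fun x hx => h x (List.mem_cons_of_mem _ hx)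
    by_cases hj : j ∈ visited
    · simp only [bfsExpand, if_pos hj]
      exact ih _ _ hrest
    · simp only [bfsExpand, if_neg hj]
      rw [ih _ _ hrest]
      have hset : (Finset.range n).filter (fun x => x ∉ visited ++ [j])
          = ((Finset.range n).filter (fun x => x ∉ visited)).erase j := by
        ext x
        simp only [Finset.mem_filter, Finset.mem_erase, Finset.mem_range, List.mem_append,
          List.mem_singleton]
        tauto
      have hmem : j ∈ (Finset.range n).filter (fun x => x ∉ visited) := by
        simp [Finset.mem_filter, Finset.mem_range, hjn, hj]
      have hpos : 0 < ((Finset.range n).filter (fun x => x ∉ visited)).card :=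
        Finset.card_pos.mpr ⟨j, hmem⟩
      have hcard := Finset.card_erase_of_mem hmem
      simp only [pvUnvisited, hset, List.length_append, List.length_singleton, hcard]
      omega

theorem getD_mem_bound {adj : List (List Nat)} {n : Nat}
    (hadj : ∀ l ∈ adj, ∀ j ∈ l, j < n) (i : Nat) : ∀ j ∈ adj.getD i [], j < n := by
  intro j hj
  rw [List.getD_eq_getElem?_getD] at hj
  cases hg : adj[i]? with
  | none => rw [hg] at hj; simp at hj
  | some l => rw [hg] at hj; exact hadj l (List.mem_of_getElem? hg) j hj

-- the while-loop of A's BFS (the Prop argument only justifies termination)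
def bfsAux (n target : Nat) (adj : List (List Nat)) (queue visited : List Nat)
    (hadj : ∀ l ∈ adj, ∀ j ∈ l, j < n) : Bool :=
  match queue with
  | [] => false
  | curr :: rest =>
    if curr = target then true
    else
      bfsAux n target adj (bfsExpand (adj.getD curr []) rest visited).1
        (bfsExpand (adj.getD curr []) rest visited).2 hadj
termination_by pvUnvisited n visited + queue.length
decreasing_by
  have := bfsExpand_measure (adj.getD curr []) rest visited (getD_mem_bound hadj curr)
  simp only [List.length_cons]
  omega

def can_connect_path (path : List Int) (laser_detector : List (List Int)) : Bool :=
  match path with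
  | [] => false
  | _ :: _ =>
    bfsAux path.length (path.length - 1)
      (buildAdj (buildIdx path) path.length laser_detector) [0] [0]
      (buildAdj_bound path laser_detector)

-- ===== PORT B =====
-- 'for nxt in adj[i]: reachable[nxt] = True'
def markAll (tbl : List Bool) (nbrs : List Nat) : List Bool :=
  nbrs.foldl (fun t j => t.set j true) tbl

-- 'for i in range(len(path)): if reachable[i]: …'
def sweep (n : Nat) (adj : List (List Nat)) (tbl : List Bool) : List Bool :=
  (List.range n).foldl (fun t i => if t.getD i false then markAll t (adj.getD i []) else t) tbl

def can_connect_path_alt (path : List Int) (laser_detector : List (List Int)) : Bool :=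
  match path with
  | [] => false
  | _ :: _ =>
    (sweep path.length (buildAdj (buildIdx path) path.length laser_detector)
        ((List.replicate path.length false).set 0 true)).getD (path.length - 1) false

-- ===== PRECONDITION & SPEC =====
-- Pre_ excludes edge entries that are not 2-element lists: Python's 'for u, v in
-- laser_detector' raises ValueError/TypeError on them, so A returns nothing there.
def Pre_can_connect_path (path : List Int) (laser_detector : List (List Int)) : Prop :=
  ∀ e ∈ laser_detector, e.length = 2
instance (path : List Int) (laser_detector : List (List Int)) : Decidable (Pre_can_connect_path path laser_detector) := by unfold Pre_can_connect_path; infer_instance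

def pvWitness_can_connect_path : List Int × List (List Int) := ([0, 1, 2], [[0, 1], [1, 2]])

def Spec_can_connect_path (path : List Int) (laser_detector : List (List Int)) (out : Bool) : Prop := out = can_connect_path_alt path laser_detector
instance (path : List Int) (laser_detector : List (List Int)) (out : Bool) : Decidable (Spec_can_connect_path path laser_detector out) := by unfold Spec_can_connect_path; infer_instance

-- ===== CLAIM (what is proved, stated in full; the proofs are below) =====
def Claim_equal_can_connect_path : Prop := ∀ (path : List Int) (laser_detector : List (List Int)), Dom_can_connect_path path laser_detector → Pre_can_connect_path path laser_detector → Spec_can_connect_path path laser_detector (can_connect_path path laser_detector)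

-- ===== LEMMAS AND PROOFS =====

-- reachability from index 0 along the stored forward edges: the common spec of both loops
inductive PvReach (adj : List (List Nat)) : Nat → Prop
  | zero : PvReach adj 0
  | step {i j : Nat} : PvReach adj i → j ∈ adj.getD i [] → PvReach adj j

theorem bfsExpand_spec (nbrs queue visited : List Nat) :
    (∀ x ∈ visited, x ∈ (bfsExpand nbrs queue visited).2) ∧
    (∀ x ∈ queue, x ∈ (bfsExpand nbrs queue visited).1) ∧
    (∀ x ∈ (bfsExpand nbrs queue visited).2, x ∈ visited ∨ x ∈ nbrs) ∧
    (∀ x ∈ nbrs, x ∈ (bfsExpand nbrs queue visited).2) ∧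
    (∀ x ∈ (bfsExpand nbrs queue visited).1, x ∈ queue ∨ x ∈ (bfsExpand nbrs queue visited).2) ∧
    (∀ x, x ∈ (bfsExpand nbrs queue visited).2 → x ∉ (bfsExpand nbrs queue visited).1 → x ∈ visited) := by
  induction nbrs generalizing queue visited with
  | nil =>
    refine ⟨fun x hx => hx, fun x hx => hx, fun x hx => Or.inl hx, ?_, fun x hx => Or.inl hx,
      fun x hx _ => hx⟩
    intro x hx; simp at hx
  | cons j rest ih =>
    by_cases hj : j ∈ visited
    · simp only [bfsExpand, if_pos hj]
      obtain ⟨E1, E2, E3, E4, E5, E6⟩ := ih queue visited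
      refine ⟨E1, E2, ?_, ?_, E5, E6⟩
      · intro x hx
        rcases E3 x hx with h | h
        · exact Or.inl h
        · exact Or.inr (List.mem_cons_of_mem _ h)
      · intro x hx
        rcases List.mem_cons.mp hx with rfl | h
        · exact E1 x hj
        · exact E4 x h
    · simp only [bfsExpand, if_neg hj]
      obtain ⟨E1, E2, E3, E4, E5, E6⟩ := ih (queue ++ [j]) (visited ++ [j])
      have hv : ∀ x ∈ visited, x ∈ visited ++ [j] := fun x hx => List.mem_append.mpr (Or.inl hx)
      have hjv : j ∈ visited ++ [j] := List.mem_append.mpr (Or.inr (List.mem_singleton.mpr rfl))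
      refine ⟨fun x hx => E1 x (hv x hx), fun x hx => E2 x (List.mem_append.mpr (Or.inl hx)),
        ?_, ?_, ?_, ?_⟩
      · intro x hx
        rcases E3 x hx with h | h
        · rcases List.mem_append.mp h with h' | h'
          · exact Or.inl h'
          · exact Or.inr (List.mem_cons.mpr (Or.inl (List.mem_singleton.mp h')))
        · exact Or.inr (List.mem_cons_of_mem _ h)
      · intro x hx
        rcases List.mem_cons.mp hx with rfl | h
        · exact E1 x hjv
        · exact E4 x h
      · intro x hx
        rcases E5 x hx with h | h
        · rcases List.mem_append.mp h with h' | h'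
          · exact Or.inl h'
          · exact Or.inr (E1 x (List.mem_singleton.mp h' ▸ hjv))
        · exact Or.inr h
      · intro x hx hnx
        rcases List.mem_append.mp (E6 x hx hnx) with h | h
        · exact h
        · exact absurd (E2 x (List.mem_append.mpr (Or.inr h))) hnx

theorem bfsAux_iff (n target : Nat) (adj : List (List Nat))
    (hadj : ∀ l ∈ adj, ∀ j ∈ l, j < n) (queue visited : List Nat)
    (h1 : 0 ∈ visited) (h2 : ∀ x ∈ queue, x ∈ visited)
    (h3 : ∀ x ∈ visited, PvReach adj x)
    (h4 : ∀ i ∈ visited, i ∉ queue → ∀ j ∈ adj.getD i [], j ∈ visited)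
    (h5 : target ∉ visited ∨ target ∈ queue) :
    (bfsAux n target adj queue visited hadj = true ↔ PvReach adj target) := by
  revert h1 h2 h3 h4 h5
  fun_induction bfsAux n target adj queue visited hadj with
  | case1 visited =>
    intro h1 h2 h3 h4 h5
    simp only [Bool.false_eq_true, false_iff]
    intro hr
    have sub : ∀ x, PvReach adj x → x ∈ visited := by
      intro x hx
      induction hx with
      | zero => exact h1
      | step hi hj ih2 => exact h4 _ ih2 (List.not_mem_nil) _ hj
    rcases h5 with h5 | h5
    · exact h5 (sub _ hr)
    · simp at h5
  | case2 visited rest =>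
    intro h1 h2 h3 h4 h5
    simp only [true_iff]
    exact h3 target (h2 target List.mem_cons_self)
  | case3 visited curr rest hne ih =>
    intro h1 h2 h3 h4 h5
    obtain ⟨E1, E2, E3, E4, E5, E6⟩ := bfsExpand_spec (adj.getD curr []) rest visited
    have hcv : curr ∈ visited := h2 curr List.mem_cons_self
    have hrest : ∀ x ∈ rest, x ∈ visited := fun x hx => h2 x (List.mem_cons_of_mem _ hx)
    refine ih (E1 0 h1) ?_ ?_ ?_ ?_
    · intro x hx
      rcases E5 x hx with h | h
      · exact E1 x (hrest x h)
      · exact h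
    · intro x hx
      rcases E3 x hx with h | h
      · exact h3 x h
      · exact PvReach.step (h3 curr hcv) h
    · intro i hi hni j hj
      have hir : i ∉ rest := fun h => hni (E2 i h)
      by_cases hic : i = curr
      · subst hic; exact E4 j hj
      · have : i ∉ curr :: rest := by
          intro h; rcases List.mem_cons.mp h with h' | h'
          · exact hic h'
          · exact hir h'
        exact E1 j (h4 i (E6 i hi hni) this j hj)
    · by_cases ht : target ∈ (bfsExpand (adj.getD curr []) rest visited).1
      · exact Or.inr ht
      · refine Or.inl ?_
        intro hmem
        have htv : target ∈ visited := E6 target hmem ht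
        rcases h5 with h5 | h5
        · exact h5 htv
        · rcases List.mem_cons.mp h5 with h' | h'
          · exact hne h'.symm
          · exact ht (E2 target h')

theorem markAll_getD (nbrs : List Nat) (tbl : List Bool)
    (hn : ∀ j ∈ nbrs, j < tbl.length) (k : Nat) :
    (markAll tbl nbrs).getD k false = (tbl.getD k false || decide (k ∈ nbrs)) := by
  induction nbrs generalizing tbl with
  | nil => simp [markAll]
  | cons j rest ih =>
    have hjl : j < tbl.length := hn j List.mem_cons_self
    have hrest : ∀ m ∈ rest, m < (tbl.set j true).length := by
      intro m hm; rw [List.length_set]; exact hn m (List.mem_cons_of_mem _ hm)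
    have step : markAll tbl (j :: rest) = markAll (tbl.set j true) rest := rfl
    rw [step, ih _ hrest]
    have hset : (tbl.set j true).getD k false = if j = k then true else tbl.getD k false := by
      rw [List.getD_eq_getElem?_getD, List.getElem?_set, List.getD_eq_getElem?_getD]
      by_cases hjk : j = k
      · simp [hjk, hjk ▸ hjl]
      · simp [hjk]
    rw [hset]
    by_cases hjk : j = k
    · simp [hjk]
    · have : (k ∈ j :: rest) = (k ∈ rest) := by
        simp only [List.mem_cons, eq_comm (a := k) (b := j)]
        simp [hjk]
      simp [hjk, this]

theorem markAll_length (nbrs : List Nat) (tbl : List Bool) :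
    (markAll tbl nbrs).length = tbl.length := by
  induction nbrs generalizing tbl with
  | nil => rfl
  | cons j rest ih =>
    have : markAll tbl (j :: rest) = markAll (tbl.set j true) rest := rfl
    rw [this, ih, List.length_set]

def SweepInv (n : Nat) (adj : List (List Nat)) (i : Nat) (tbl : List Bool) : Prop :=
  tbl.length = n ∧ tbl.getD 0 false = true ∧
  (∀ k, tbl.getD k false = true → PvReach adj k) ∧
  (∀ j, j < i → tbl.getD j false = true → ∀ m ∈ adj.getD j [], tbl.getD m false = true)

theorem sweepStep_inv (n : Nat) (adj : List (List Nat))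
    (hfwd : ∀ i j, j ∈ adj.getD i [] → i < j ∧ j < n)
    (i : Nat) (tbl : List Bool) (hi : SweepInv n adj i tbl) :
    SweepInv n adj (i + 1)
      (if tbl.getD i false then markAll tbl (adj.getD i []) else tbl) := by
  obtain ⟨hl, h0, hs, hc⟩ := hi
  by_cases hb : tbl.getD i false = true
  · rw [if_pos hb]
    have hn : ∀ m ∈ adj.getD i [], m < tbl.length := by
      intro m hm; rw [hl]; exact (hfwd i m hm).2
    refine ⟨by rw [markAll_length]; exact hl, ?_, ?_, ?_⟩
    · rw [markAll_getD _ _ hn, h0]; rfl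
    · intro k hk
      rw [markAll_getD _ _ hn] at hk
      rcases Bool.or_eq_true_iff.mp hk with h | h
      · exact hs k h
      · exact PvReach.step (hs i hb) (of_decide_eq_true h)
    · intro j hj hjt m hm
      rw [markAll_getD _ _ hn] at hjt ⊢
      have hjt' : tbl.getD j false = true := by
        rcases Bool.or_eq_true_iff.mp hjt with h | h
        · exact h
        · have := (hfwd i j (of_decide_eq_true h)).1
          omega
      by_cases hji : j = i
      · subst hji
        simp only [hm, decide_true, Bool.or_true]
      · have hjlt : j < i := by omega
        rw [hc j hjlt hjt' m hm]; rfl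
  · rw [if_neg hb]
    refine ⟨hl, h0, hs, ?_⟩
    intro j hj hjt m hm
    by_cases hji : j = i
    · subst hji; exact absurd hjt hb
    · exact hc j (by omega) hjt m hm

theorem sweep_iff (n : Nat) (adj : List (List Nat))
    (hfwd : ∀ i j, j ∈ adj.getD i [] → i < j ∧ j < n)
    (tbl : List Bool) (hinv : SweepInv n adj 0 tbl) (k : Nat) :
    ((sweep n adj tbl).getD k false = true ↔ PvReach adj k) := by
  have go : ∀ (c i : Nat) (t : List Bool), i + c = n → SweepInv n adj i t →
      SweepInv n adj n ((List.range' i c).foldl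
        (fun t i => if t.getD i false then markAll t (adj.getD i []) else t) t) := by
    intro c
    induction c with
    | zero =>
      intro i t hic hinv
      simpa using (by omega : i = n) ▸ hinv
    | succ m ih =>
      intro i t hic hinv
      rw [List.range'_succ, List.foldl_cons]
      exact ih (i + 1) _ (by omega) (sweepStep_inv n adj hfwd i t hinv)
  have hfin : SweepInv n adj n (sweep n adj tbl) := by
    unfold sweep
    rw [List.range_eq_range']
    exact go n 0 tbl (by omega) hinv
  obtain ⟨hl, h0, hs, hc⟩ := hfin
  constructor
  · exact hs k
  · intro hr
    induction hr with
    | zero => exact h0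
    | step hi hj ih2 =>
      rename_i i j
      exact hc i (by have := hfwd i j hj; omega) ih2 j hj


-- ===== VERDICT (by name: the statement is the Claim_ definition above) =====
theorem can_connect_path_spec : Claim_equal_can_connect_path := by
  intro path ld _hdom _hpre
  unfold Spec_can_connect_path
  cases path with
  | nil => rfl
  | cons a p =>
    have hidx := buildIdx_lt (a :: p)
    obtain ⟨hlen, hfwd⟩ := buildAdj_inv (buildIdx (a :: p)) (a :: p).length ld hidx
    have hA := bfsAux_iff (a :: p).length ((a :: p).length - 1)
        (buildAdj (buildIdx (a :: p)) (a :: p).length ld) (buildAdj_bound (a :: p) ld)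
        [0] [0]
        (by simp)
        (by intro x hx; exact hx)
        (by intro x hx; simp at hx; subst hx; exact PvReach.zero)
        (by intro i hi hni; exact absurd hi hni)
        (by
          by_cases h : (a :: p).length - 1 = 0
          · exact Or.inr (by simp only [List.mem_singleton]; omega)
          · exact Or.inl (by simp only [List.mem_singleton]; omega))
    have hinv0 : SweepInv (a :: p).length (buildAdj (buildIdx (a :: p)) (a :: p).length ld) 0
        ((List.replicate (a :: p).length false).set 0 true) := by
      refine ⟨by simp, ?_, ?_, ?_⟩
      · rw [List.getD_eq_getElem?_getD, List.getElem?_set]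
        simp
      · intro k hk
        rw [List.getD_eq_getElem?_getD, List.getElem?_set] at hk
        by_cases hk0 : k = 0
        · exact hk0 ▸ PvReach.zero
        · rw [if_neg (fun h => hk0 h.symm), List.getElem?_replicate] at hk
          split at hk <;> simp at hk
      · intro j hj; omega
    have hB := sweep_iff (a :: p).length (buildAdj (buildIdx (a :: p)) (a :: p).length ld) hfwd
        ((List.replicate (a :: p).length false).set 0 true) hinv0 ((a :: p).length - 1)
    show can_connect_path (a :: p) ld = can_connect_path_alt (a :: p) ld
    unfold can_connect_path can_connect_path_alt
    rw [Bool.eq_iff_iff, hA, hB]
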